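-- pv_equiv track=rewrite | github.com/Signbank/Global-signbank | signbank/communication/models.py | check_nesting_structure_of_context_variable
-- ===== SOURCE A (Python) =====
-- def typed_context():
--     # template context with strings per email type
--     placeholders = {'-': {},
--                     'activation_email': {'site': {'name': 'SITE NAME',
--                                                   'domain': 'SITE DOMAIN'},
--                                          'activation_key': 'ACTIVATION KEY',
--                                          'expiration_days': 'EXPIRATION DAYS',
--                                          'url': 'URL'},
--                     'dataset_to_owner_existing_user_given_access': {'user': {'first_name': 'FIRST NAME',
--                                                                              'last_name': 'LAST NAME',
--                                                                              'email': 'EMAIL',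
--                                                                              'username': 'USERNAME'},
--                                                                     'dataset': 'DATASET',
--                                                                     'motivation': 'MOTIVATION',
--                                                                     'site': {'name': 'SITE NAME',
--                                                                              'domain': 'SITE DOMAIN'}
--                                                                     },
--                     'dataset_to_owner_new_user_given_access': {'dataset': 'DATASET',
--                                                                'user': {'first_name': 'FIRST NAME',
--                                                                         'last_name': 'LAST NAME',
--                                                                         'email': 'EMAIL',
--                                                                         'username': 'USERNAME'},
--                                                                'motivation':'MOTIVATION',
--                                                                'site': {'name': 'SITE NAME',
--                                                                         'domain': 'SITE DOMAIN'}
--                                                                },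
--                     'dataset_to_owner_user_requested_access': {'dataset': 'DATASET',
--                                                                'user': {'first_name': 'FIRST NAME',
--                                                                         'last_name': 'LAST NAME',
--                                                                         'email': 'EMAIL',
--                                                                         'username': 'USERNAME'},
--                                                                'motivation':'MOTIVATION',
--                                                                'site': {'name': 'SITE NAME',
--                                                                         'domain': 'SITE DOMAIN'}
--                                                                },
--                     'dataset_to_user_existing_user_given_access': {'dataset': 'DATASET',
--                                                                    'site': {'name': 'SITE NAME',
--                                                                             'domain': 'SITE DOMAIN'}
--                                                                    }
--                     }
--     return placeholders
--
-- def check_nesting_structure_of_context_variable(label, lookup_pattern):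
--     context_lookup = typed_context()
--     if label not in context_lookup.keys():
--         return False
--     typed_lookup = context_lookup[label]
--     allowed_patterns = []
--     for outer_key, value in typed_lookup.items():
--         if isinstance(value, dict):
--             for inner_key in value.keys():
--                 allowed_patterns.append(f'{outer_key}.{inner_key}')
--         else:
--             allowed_patterns.append(outer_key)
--     return lookup_pattern in allowed_patterns
-- ===== SOURCE B (Python) =====
-- # B: instead of materialising all allowed dotted patterns, use a precomputed schema
-- # (scalar keys + map of nested sub-keys per label) and navigate it after splitting
-- # the pattern at its first dot.
--
-- _SITE = ('name', 'domain')
-- _USER = ('first_name', 'last_name', 'email', 'username')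
--
-- _SCHEMA = {
--     '-': ((), {}),
--     'activation_email': (('activation_key', 'expiration_days', 'url'), {'site': _SITE}),
--     'dataset_to_owner_existing_user_given_access': (('dataset', 'motivation'),
--                                                     {'user': _USER, 'site': _SITE}),
--     'dataset_to_owner_new_user_given_access': (('dataset', 'motivation'),
--                                                {'user': _USER, 'site': _SITE}),
--     'dataset_to_owner_user_requested_access': (('dataset', 'motivation'),
--                                                {'user': _USER, 'site': _SITE}),
--     'dataset_to_user_existing_user_given_access': (('dataset',), {'site': _SITE}),
-- }
--
--
-- def check_nesting_structure_of_context_variable(label, lookup_pattern):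
--     schema = _SCHEMA.get(label)
--     if schema is None:
--         return False
--     scalars, nested = schema
--     outer, dot, inner = lookup_pattern.partition('.')
--     if not dot:
--         return outer in scalars
--     sub = nested.get(outer)
--     return sub is not None and inner in sub
-- ===== Notes on version B (the rewrite author's own statement) =====
-- stated objective: simpler
-- what changed: B replaces A's materialise-then-scan over all allowed dotted patterns by a precomputed schema (scalar keys plus a map of nested sub-keys per label) navigated after partitioning the pattern at its first dot.
import Mathlib
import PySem

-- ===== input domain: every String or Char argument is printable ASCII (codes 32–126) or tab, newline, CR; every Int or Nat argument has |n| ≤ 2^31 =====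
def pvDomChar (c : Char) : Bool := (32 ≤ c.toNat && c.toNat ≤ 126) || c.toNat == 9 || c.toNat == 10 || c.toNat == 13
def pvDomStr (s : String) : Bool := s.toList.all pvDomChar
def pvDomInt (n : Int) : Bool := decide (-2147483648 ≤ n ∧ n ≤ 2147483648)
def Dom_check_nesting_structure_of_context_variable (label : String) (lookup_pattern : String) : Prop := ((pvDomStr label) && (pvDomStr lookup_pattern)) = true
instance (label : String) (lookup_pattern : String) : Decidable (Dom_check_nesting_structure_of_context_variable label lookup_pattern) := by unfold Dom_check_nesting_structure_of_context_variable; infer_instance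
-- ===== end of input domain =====

-- B replaces A's materialise-all-allowed-patterns scan by a precomputed schema (scalar keys + nested-key map) navigated after partitioning the pattern at its first dot (objective: simpler).


-- ===== PORT A =====
-- A-side helpers: the fixed nested template context of typed_context().
inductive CtxVal where
  | leaf : String → CtxVal
  | node : List (String × String) → CtxVal
deriving DecidableEq, Repr

def pvSite : List (String × String) := [("name", "SITE NAME"), ("domain", "SITE DOMAIN")]

def pvUser : List (String × String) :=
  [("first_name", "FIRST NAME"), ("last_name", "LAST NAME"), ("email", "EMAIL"), ("username", "USERNAME")]

def pvTypedContext : List (String × List (String × CtxVal)) :=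
  [("-", []),
   ("activation_email",
     [("site", CtxVal.node pvSite),
      ("activation_key", CtxVal.leaf "ACTIVATION KEY"),
      ("expiration_days", CtxVal.leaf "EXPIRATION DAYS"),
      ("url", CtxVal.leaf "URL")]),
   ("dataset_to_owner_existing_user_given_access",
     [("user", CtxVal.node pvUser),
      ("dataset", CtxVal.leaf "DATASET"),
      ("motivation", CtxVal.leaf "MOTIVATION"),
      ("site", CtxVal.node pvSite)]),
   ("dataset_to_owner_new_user_given_access",
     [("dataset", CtxVal.leaf "DATASET"),
      ("user", CtxVal.node pvUser),
      ("motivation", CtxVal.leaf "MOTIVATION"),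
      ("site", CtxVal.node pvSite)]),
   ("dataset_to_owner_user_requested_access",
     [("dataset", CtxVal.leaf "DATASET"),
      ("user", CtxVal.node pvUser),
      ("motivation", CtxVal.leaf "MOTIVATION"),
      ("site", CtxVal.node pvSite)]),
   ("dataset_to_user_existing_user_given_access",
     [("dataset", CtxVal.leaf "DATASET"),
      ("site", CtxVal.node pvSite)])]

-- Port of A: materialise the full list of allowed patterns, then scan it for lookup_pattern.
def check_nesting_structure_of_context_variable (label : String) (lookup_pattern : String) : Bool :=
  let context_lookup := pvTypedContext
  if !(context_lookup.map (·.1)).contains label then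
    false
  else
    match context_lookup.find? (fun kv => kv.1 == label) with
    | none => false
    | some (_, typed_lookup) =>
      let allowed_patterns := typed_lookup.foldl (fun acc kv =>
        match kv.2 with
        | CtxVal.node value => acc ++ value.map (fun ik => kv.1.toList ++ '.' :: ik.1.toList)
        | CtxVal.leaf _ => acc ++ [kv.1.toList]) ([] : List (List Char))
      allowed_patterns.contains lookup_pattern.toList

-- ===== PORT B =====
-- B-side helpers: B's own precomputed schema — per label, the scalar keys and a map
-- from nested outer keys to their sub-keys (the dict values themselves are irrelevant).
def altSite : List (List Char) := [['n','a','m','e'], ['d','o','m','a','i','n']]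

def altUser : List (List Char) :=
  [['f','i','r','s','t','_','n','a','m','e'], ['l','a','s','t','_','n','a','m','e'],
   ['e','m','a','i','l'], ['u','s','e','r','n','a','m','e']]

def altSchema : List (String × (List (List Char) × List (List Char × List (List Char)))) :=
  [("-", ([], [])),
   ("activation_email",
     ([['a','c','t','i','v','a','t','i','o','n','_','k','e','y'],
       ['e','x','p','i','r','a','t','i','o','n','_','d','a','y','s'],
       ['u','r','l']],
      [(['s','i','t','e'], altSite)])),
   ("dataset_to_owner_existing_user_given_access",
     ([['d','a','t','a','s','e','t'], ['m','o','t','i','v','a','t','i','o','n']],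
      [(['u','s','e','r'], altUser), (['s','i','t','e'], altSite)])),
   ("dataset_to_owner_new_user_given_access",
     ([['d','a','t','a','s','e','t'], ['m','o','t','i','v','a','t','i','o','n']],
      [(['u','s','e','r'], altUser), (['s','i','t','e'], altSite)])),
   ("dataset_to_owner_user_requested_access",
     ([['d','a','t','a','s','e','t'], ['m','o','t','i','v','a','t','i','o','n']],
      [(['u','s','e','r'], altUser), (['s','i','t','e'], altSite)])),
   ("dataset_to_user_existing_user_given_access",
     ([['d','a','t','a','s','e','t']],
      [(['s','i','t','e'], altSite)]))]

-- Hand-port of Python's str.partition('.') for the one-character separator '.':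
-- scan to the FIRST '.'; exact — (before, sep-found?, after).
def altPartition : List Char → List Char × Bool × List Char
  | [] => ([], false, [])
  | c :: rest =>
    if c = '.' then ([], true, rest)
    else
      let p := altPartition rest
      (c :: p.1, p.2.1, p.2.2)

-- Port of B: look the label up in the schema, partition the pattern at its first dot,
-- and check the scalar keys (no dot) or the nested map (dot).
def check_nesting_structure_of_context_variable_alt (label : String) (lookup_pattern : String) : Bool :=
  match altSchema.find? (fun kv => kv.1 == label) with
  | none => false
  | some (_, scalars, nested) =>
    match altPartition lookup_pattern.toList with
    | (outer, false, _) => scalars.contains outer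
    | (outer, true, inner) =>
      match nested.find? (fun kv => kv.1 == outer) with
      | none => false
      | some (_, sub) => sub.contains inner

-- ===== PRECONDITION & SPEC =====
def Spec_check_nesting_structure_of_context_variable (label : String) (lookup_pattern : String) (out : Bool) : Prop := out = check_nesting_structure_of_context_variable_alt label lookup_pattern
instance (label : String) (lookup_pattern : String) (out : Bool) : Decidable (Spec_check_nesting_structure_of_context_variable label lookup_pattern out) := by unfold Spec_check_nesting_structure_of_context_variable; infer_instance

-- ===== CLAIM =====
def Claim_equal_check_nesting_structure_of_context_variable : Prop := ∀ (label : String) (lookup_pattern : String), Dom_check_nesting_structure_of_context_variable label lookup_pattern → Spec_check_nesting_structure_of_context_variable label lookup_pattern (check_nesting_structure_of_context_variable label lookup_pattern)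

-- ===== LEMMAS AND PROOFS =====
theorem altPartition_none : ∀ (cs o i : List Char), altPartition cs = (o, false, i) → o = cs := by
  intro cs
  induction cs with
  | nil => intro o i h; simp [altPartition] at h; exact h.1
  | cons c rest ih =>
    intro o i h
    rcases hq : altPartition rest with ⟨ro, rd, ri⟩
    simp only [altPartition, hq] at h
    split at h
    · simp at h
    · rw [Prod.mk.injEq, Prod.mk.injEq] at h
      obtain ⟨ho, hd, hi⟩ := h
      subst hd
      rw [← ho, ih ro ri hq]

theorem altPartition_some : ∀ (cs o i : List Char), altPartition cs = (o, true, i) → cs = o ++ '.' :: i := by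
  intro cs
  induction cs with
  | nil => intro o i h; simp [altPartition] at h
  | cons c rest ih =>
    intro o i h
    rcases hq : altPartition rest with ⟨ro, rd, ri⟩
    simp only [altPartition, hq] at h
    split at h
    · rename_i hc
      rw [Prod.mk.injEq, Prod.mk.injEq] at h
      obtain ⟨ho, -, hi⟩ := h
      subst hc; rw [← ho, ← hi]; rfl
    · rw [Prod.mk.injEq, Prod.mk.injEq] at h
      obtain ⟨ho, hd, hi⟩ := h
      subst hd
      rw [← ho, ← hi, List.cons_append, ← ih ro ri hq]

theorem pvLab0 (lp : String) : check_nesting_structure_of_context_variable "-" lp = check_nesting_structure_of_context_variable_alt "-" lp := by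
  simp only [check_nesting_structure_of_context_variable, check_nesting_structure_of_context_variable_alt]
  simp [pvTypedContext, altSchema, List.find?]
  rcases h : altPartition lp.toList with ⟨o, d, i⟩
  cases d <;> simp

theorem pvLab1 (lp : String) : check_nesting_structure_of_context_variable "activation_email" lp = check_nesting_structure_of_context_variable_alt "activation_email" lp := by
  simp only [check_nesting_structure_of_context_variable, check_nesting_structure_of_context_variable_alt]
  simp [pvTypedContext, pvSite, pvUser, altSchema, altSite, altUser, List.find?]
  generalize lp.toList = cs
  by_cases h1 : cs = ['s', 'i', 't', 'e', '.', 'n', 'a', 'm', 'e']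
  · subst h1; decide
  by_cases h2 : cs = ['s', 'i', 't', 'e', '.', 'd', 'o', 'm', 'a', 'i', 'n']
  · subst h2; decide
  by_cases h3 : cs = ['a', 'c', 't', 'i', 'v', 'a', 't', 'i', 'o', 'n', '_', 'k', 'e', 'y']
  · subst h3; decide
  by_cases h4 : cs = ['e', 'x', 'p', 'i', 'r', 'a', 't', 'i', 'o', 'n', '_', 'd', 'a', 'y', 's']
  · subst h4; decide
  by_cases h5 : cs = ['u', 'r', 'l']
  · subst h5; decide
  simp only [h1, h2, h3, h4, h5, decide_false, Bool.or_self]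
  rcases hp : altPartition cs with ⟨o, d, i⟩
  cases d
  · obtain rfl := altPartition_none cs o i hp
    simp
    exact ⟨h3, h4, h5⟩
  · have hcs := altPartition_some cs o i hp
    by_cases go : o = ['s', 'i', 't', 'e']
    · subst go
      by_cases gi1 : i = ['n', 'a', 'm', 'e']
      · subst gi1; exact absurd (hcs.trans (by decide)) h1
      by_cases gi2 : i = ['d', 'o', 'm', 'a', 'i', 'n']
      · subst gi2; exact absurd (hcs.trans (by decide)) h2
      simp
      exact ⟨gi1, gi2⟩
    · simp [beq_eq_decide, Ne.symm go]

theorem pvLab2 (lp : String) : check_nesting_structure_of_context_variable "dataset_to_owner_existing_user_given_access" lp = check_nesting_structure_of_context_variable_alt "dataset_to_owner_existing_user_given_access" lp := by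
  simp only [check_nesting_structure_of_context_variable, check_nesting_structure_of_context_variable_alt]
  simp [pvTypedContext, pvSite, pvUser, altSchema, altSite, altUser, List.find?]
  generalize lp.toList = cs
  by_cases h1 : cs = ['u', 's', 'e', 'r', '.', 'f', 'i', 'r', 's', 't', '_', 'n', 'a', 'm', 'e']
  · subst h1; decide
  by_cases h2 : cs = ['u', 's', 'e', 'r', '.', 'l', 'a', 's', 't', '_', 'n', 'a', 'm', 'e']
  · subst h2; decide
  by_cases h3 : cs = ['u', 's', 'e', 'r', '.', 'e', 'm', 'a', 'i', 'l']
  · subst h3; decide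
  by_cases h4 : cs = ['u', 's', 'e', 'r', '.', 'u', 's', 'e', 'r', 'n', 'a', 'm', 'e']
  · subst h4; decide
  by_cases h5 : cs = ['d', 'a', 't', 'a', 's', 'e', 't']
  · subst h5; decide
  by_cases h6 : cs = ['m', 'o', 't', 'i', 'v', 'a', 't', 'i', 'o', 'n']
  · subst h6; decide
  by_cases h7 : cs = ['s', 'i', 't', 'e', '.', 'n', 'a', 'm', 'e']
  · subst h7; decide
  by_cases h8 : cs = ['s', 'i', 't', 'e', '.', 'd', 'o', 'm', 'a', 'i', 'n']
  · subst h8; decide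
  simp only [h1, h2, h3, h4, h5, h6, h7, h8, decide_false, Bool.or_self]
  rcases hp : altPartition cs with ⟨o, d, i⟩
  cases d
  · obtain rfl := altPartition_none cs o i hp
    simp <;> tauto
  · have hcs := altPartition_some cs o i hp
    by_cases go : o = ['u', 's', 'e', 'r']
    · subst go
      by_cases gi1 : i = ['f', 'i', 'r', 's', 't', '_', 'n', 'a', 'm', 'e']
      · subst gi1; exact absurd (hcs.trans (by decide)) h1
      by_cases gi2 : i = ['l', 'a', 's', 't', '_', 'n', 'a', 'm', 'e']
      · subst gi2; exact absurd (hcs.trans (by decide)) h2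
      by_cases gi3 : i = ['e', 'm', 'a', 'i', 'l']
      · subst gi3; exact absurd (hcs.trans (by decide)) h3
      by_cases gi4 : i = ['u', 's', 'e', 'r', 'n', 'a', 'm', 'e']
      · subst gi4; exact absurd (hcs.trans (by decide)) h4
      simp <;> tauto
    by_cases go2 : o = ['s', 'i', 't', 'e']
    · subst go2
      by_cases gi1 : i = ['n', 'a', 'm', 'e']
      · subst gi1; exact absurd (hcs.trans (by decide)) h7
      by_cases gi2 : i = ['d', 'o', 'm', 'a', 'i', 'n']
      · subst gi2; exact absurd (hcs.trans (by decide)) h8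
      simp <;> tauto
    simp [beq_eq_decide, Ne.symm go, Ne.symm go2]

theorem pvLab3 (lp : String) : check_nesting_structure_of_context_variable "dataset_to_owner_new_user_given_access" lp = check_nesting_structure_of_context_variable_alt "dataset_to_owner_new_user_given_access" lp := by
  simp only [check_nesting_structure_of_context_variable, check_nesting_structure_of_context_variable_alt]
  simp [pvTypedContext, pvSite, pvUser, altSchema, altSite, altUser, List.find?]
  generalize lp.toList = cs
  by_cases h1 : cs = ['u', 's', 'e', 'r', '.', 'f', 'i', 'r', 's', 't', '_', 'n', 'a', 'm', 'e']
  · subst h1; decide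
  by_cases h2 : cs = ['u', 's', 'e', 'r', '.', 'l', 'a', 's', 't', '_', 'n', 'a', 'm', 'e']
  · subst h2; decide
  by_cases h3 : cs = ['u', 's', 'e', 'r', '.', 'e', 'm', 'a', 'i', 'l']
  · subst h3; decide
  by_cases h4 : cs = ['u', 's', 'e', 'r', '.', 'u', 's', 'e', 'r', 'n', 'a', 'm', 'e']
  · subst h4; decide
  by_cases h5 : cs = ['d', 'a', 't', 'a', 's', 'e', 't']
  · subst h5; decide
  by_cases h6 : cs = ['m', 'o', 't', 'i', 'v', 'a', 't', 'i', 'o', 'n']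
  · subst h6; decide
  by_cases h7 : cs = ['s', 'i', 't', 'e', '.', 'n', 'a', 'm', 'e']
  · subst h7; decide
  by_cases h8 : cs = ['s', 'i', 't', 'e', '.', 'd', 'o', 'm', 'a', 'i', 'n']
  · subst h8; decide
  simp only [h1, h2, h3, h4, h5, h6, h7, h8, decide_false, Bool.or_self]
  rcases hp : altPartition cs with ⟨o, d, i⟩
  cases d
  · obtain rfl := altPartition_none cs o i hp
    simp <;> tauto
  · have hcs := altPartition_some cs o i hp
    by_cases go : o = ['u', 's', 'e', 'r']
    · subst go
      by_cases gi1 : i = ['f', 'i', 'r', 's', 't', '_', 'n', 'a', 'm', 'e']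
      · subst gi1; exact absurd (hcs.trans (by decide)) h1
      by_cases gi2 : i = ['l', 'a', 's', 't', '_', 'n', 'a', 'm', 'e']
      · subst gi2; exact absurd (hcs.trans (by decide)) h2
      by_cases gi3 : i = ['e', 'm', 'a', 'i', 'l']
      · subst gi3; exact absurd (hcs.trans (by decide)) h3
      by_cases gi4 : i = ['u', 's', 'e', 'r', 'n', 'a', 'm', 'e']
      · subst gi4; exact absurd (hcs.trans (by decide)) h4
      simp <;> tauto
    by_cases go2 : o = ['s', 'i', 't', 'e']
    · subst go2
      by_cases gi1 : i = ['n', 'a', 'm', 'e']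
      · subst gi1; exact absurd (hcs.trans (by decide)) h7
      by_cases gi2 : i = ['d', 'o', 'm', 'a', 'i', 'n']
      · subst gi2; exact absurd (hcs.trans (by decide)) h8
      simp <;> tauto
    simp [beq_eq_decide, Ne.symm go, Ne.symm go2]

theorem pvLab4 (lp : String) : check_nesting_structure_of_context_variable "dataset_to_owner_user_requested_access" lp = check_nesting_structure_of_context_variable_alt "dataset_to_owner_user_requested_access" lp := by
  simp only [check_nesting_structure_of_context_variable, check_nesting_structure_of_context_variable_alt]
  simp [pvTypedContext, pvSite, pvUser, altSchema, altSite, altUser, List.find?]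
  generalize lp.toList = cs
  by_cases h1 : cs = ['u', 's', 'e', 'r', '.', 'f', 'i', 'r', 's', 't', '_', 'n', 'a', 'm', 'e']
  · subst h1; decide
  by_cases h2 : cs = ['u', 's', 'e', 'r', '.', 'l', 'a', 's', 't', '_', 'n', 'a', 'm', 'e']
  · subst h2; decide
  by_cases h3 : cs = ['u', 's', 'e', 'r', '.', 'e', 'm', 'a', 'i', 'l']
  · subst h3; decide
  by_cases h4 : cs = ['u', 's', 'e', 'r', '.', 'u', 's', 'e', 'r', 'n', 'a', 'm', 'e']
  · subst h4; decide
  by_cases h5 : cs = ['d', 'a', 't', 'a', 's', 'e', 't']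
  · subst h5; decide
  by_cases h6 : cs = ['m', 'o', 't', 'i', 'v', 'a', 't', 'i', 'o', 'n']
  · subst h6; decide
  by_cases h7 : cs = ['s', 'i', 't', 'e', '.', 'n', 'a', 'm', 'e']
  · subst h7; decide
  by_cases h8 : cs = ['s', 'i', 't', 'e', '.', 'd', 'o', 'm', 'a', 'i', 'n']
  · subst h8; decide
  simp only [h1, h2, h3, h4, h5, h6, h7, h8, decide_false, Bool.or_self]
  rcases hp : altPartition cs with ⟨o, d, i⟩
  cases d
  · obtain rfl := altPartition_none cs o i hp
    simp <;> tauto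
  · have hcs := altPartition_some cs o i hp
    by_cases go : o = ['u', 's', 'e', 'r']
    · subst go
      by_cases gi1 : i = ['f', 'i', 'r', 's', 't', '_', 'n', 'a', 'm', 'e']
      · subst gi1; exact absurd (hcs.trans (by decide)) h1
      by_cases gi2 : i = ['l', 'a', 's', 't', '_', 'n', 'a', 'm', 'e']
      · subst gi2; exact absurd (hcs.trans (by decide)) h2
      by_cases gi3 : i = ['e', 'm', 'a', 'i', 'l']
      · subst gi3; exact absurd (hcs.trans (by decide)) h3
      by_cases gi4 : i = ['u', 's', 'e', 'r', 'n', 'a', 'm', 'e']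
      · subst gi4; exact absurd (hcs.trans (by decide)) h4
      simp <;> tauto
    by_cases go2 : o = ['s', 'i', 't', 'e']
    · subst go2
      by_cases gi1 : i = ['n', 'a', 'm', 'e']
      · subst gi1; exact absurd (hcs.trans (by decide)) h7
      by_cases gi2 : i = ['d', 'o', 'm', 'a', 'i', 'n']
      · subst gi2; exact absurd (hcs.trans (by decide)) h8
      simp <;> tauto
    simp [beq_eq_decide, Ne.symm go, Ne.symm go2]

theorem pvLab5 (lp : String) : check_nesting_structure_of_context_variable "dataset_to_user_existing_user_given_access" lp = check_nesting_structure_of_context_variable_alt "dataset_to_user_existing_user_given_access" lp := by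
  simp only [check_nesting_structure_of_context_variable, check_nesting_structure_of_context_variable_alt]
  simp [pvTypedContext, pvSite, pvUser, altSchema, altSite, altUser, List.find?]
  generalize lp.toList = cs
  by_cases h1 : cs = ['d', 'a', 't', 'a', 's', 'e', 't']
  · subst h1; decide
  by_cases h2 : cs = ['s', 'i', 't', 'e', '.', 'n', 'a', 'm', 'e']
  · subst h2; decide
  by_cases h3 : cs = ['s', 'i', 't', 'e', '.', 'd', 'o', 'm', 'a', 'i', 'n']
  · subst h3; decide
  simp only [h1, h2, h3, decide_false, Bool.or_self]
  rcases hp : altPartition cs with ⟨o, d, i⟩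
  cases d
  · obtain rfl := altPartition_none cs o i hp
    simp <;> tauto
  · have hcs := altPartition_some cs o i hp
    by_cases go : o = ['s', 'i', 't', 'e']
    · subst go
      by_cases gi1 : i = ['n', 'a', 'm', 'e']
      · subst gi1; exact absurd (hcs.trans (by decide)) h2
      by_cases gi2 : i = ['d', 'o', 'm', 'a', 'i', 'n']
      · subst gi2; exact absurd (hcs.trans (by decide)) h3
      simp <;> tauto
    simp [beq_eq_decide, Ne.symm go]

-- ===== VERDICT =====
theorem check_nesting_structure_of_context_variable_spec : Claim_equal_check_nesting_structure_of_context_variable := by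
  unfold Claim_equal_check_nesting_structure_of_context_variable Spec_check_nesting_structure_of_context_variable
  intro label lp _
  by_cases hl0 : label = "-"
  · subst hl0; exact pvLab0 lp
  by_cases hl1 : label = "activation_email"
  · subst hl1; exact pvLab1 lp
  by_cases hl2 : label = "dataset_to_owner_existing_user_given_access"
  · subst hl2; exact pvLab2 lp
  by_cases hl3 : label = "dataset_to_owner_new_user_given_access"
  · subst hl3; exact pvLab3 lp
  by_cases hl4 : label = "dataset_to_owner_user_requested_access"
  · subst hl4; exact pvLab4 lp
  by_cases hl5 : label = "dataset_to_user_existing_user_given_access"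
  · subst hl5; exact pvLab5 lp
  simp [beq_eq_decide, check_nesting_structure_of_context_variable, check_nesting_structure_of_context_variable_alt, pvTypedContext, altSchema, List.find?, hl0, Ne.symm hl0, hl1, Ne.symm hl1, hl2, Ne.symm hl2, hl3, Ne.symm hl3, hl4, Ne.symm hl4, hl5, Ne.symm hl5]
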